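-- pv_equiv track=rewrite | github.com/eyedwalker/cognisom | cognisom/genomics/neoantigen_predictor.py | _generate_peptides
-- ===== SOURCE A (Python) =====
-- from typing import Dict, List, Optional, Tuple
--
-- def _generate_peptides(
--
--     sequence: str,
--     mut_pos: int,
--     wt_aa: str,
--     mut_aa: str,
--     peptide_length: int,
-- ) -> List[Tuple[str, str, int]]:
--     """Generate overlapping mutant/WT peptide pairs around a mutation.
--
--     Args:
--         sequence: Full protein sequence.
--         mut_pos: 1-indexed mutation position.
--         wt_aa: Wild-type amino acid.
--         mut_aa: Mutant amino acid.
--         peptide_length: Length of peptides to generate.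
--
--     Returns:
--         List of (mutant_peptide, wt_peptide, mutation_position_in_peptide).
--     """
--     idx = mut_pos - 1  # Convert to 0-indexed
--     seq_len = len(sequence)
--     peptides = []
--
--     # Generate all windows that contain the mutation position
--     for start in range(max(0, idx - peptide_length + 1),
--                        min(idx + 1, seq_len - peptide_length + 1)):
--         end = start + peptide_length
--         if end > seq_len:
--             break
--
--         wt_pep = sequence[start:end]
--         mut_pos_in_pep = idx - start
--
--         # Apply mutation
--         pep_list = list(wt_pep)
--         if mut_pos_in_pep < len(pep_list):
--             pep_list[mut_pos_in_pep] = mut_aa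
--         mut_pep = "".join(pep_list)
--
--         peptides.append((mut_pep, wt_pep, mut_pos_in_pep))
--
--     return peptides
-- ===== SOURCE B (Python) =====
-- from typing import List, Tuple
--
--
-- def _generate_peptides(
--     sequence: str,
--     mut_pos: int,
--     wt_aa: str,
--     mut_aa: str,
--     peptide_length: int,
-- ) -> List[Tuple[str, str, int]]:
--     """Sliding-state pass: instead of re-slicing the sequence and editing a char
--     list for every window, keep the window's before-mutation prefix (peeled one
--     char per step), its after-mutation suffix (grown one char per step) and the
--     remaining WT tail, updating this state across the window count."""
--     idx = mut_pos - 1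
--     L = peptide_length
--     n = len(sequence)
--     lo = max(0, idx - L + 1)
--     hi = min(idx + 1, n - L + 1)
--
--     pre = sequence[lo:idx]
--     suf = sequence[idx + 1:lo + L]
--     wt_rest = sequence[lo:]
--     pos = idx - lo
--     k = max(0, hi - lo)
--     out = []
--     while k > 0:
--         out.append((pre + mut_aa + suf, wt_rest[:L], pos))
--         pre = pre[1:]
--         suf = suf + wt_rest[L:L + 1]
--         wt_rest = wt_rest[1:]
--         pos -= 1
--         k -= 1
--     return out
-- ===== Notes on version B (the rewrite author's own statement) =====
-- stated objective: alternative
-- what changed: Replaces A's per-window work (slice the sequence, explode the window into a char list, guarded item assignment, join) with a single sliding-state pass that precomputes the first window's before-mutation prefix, after-mutation suffix and the WT tail once, then updates that state incrementally (peel one char off the prefix, append one char to the suffix, advance the tail) for each successive window.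
import Mathlib
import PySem

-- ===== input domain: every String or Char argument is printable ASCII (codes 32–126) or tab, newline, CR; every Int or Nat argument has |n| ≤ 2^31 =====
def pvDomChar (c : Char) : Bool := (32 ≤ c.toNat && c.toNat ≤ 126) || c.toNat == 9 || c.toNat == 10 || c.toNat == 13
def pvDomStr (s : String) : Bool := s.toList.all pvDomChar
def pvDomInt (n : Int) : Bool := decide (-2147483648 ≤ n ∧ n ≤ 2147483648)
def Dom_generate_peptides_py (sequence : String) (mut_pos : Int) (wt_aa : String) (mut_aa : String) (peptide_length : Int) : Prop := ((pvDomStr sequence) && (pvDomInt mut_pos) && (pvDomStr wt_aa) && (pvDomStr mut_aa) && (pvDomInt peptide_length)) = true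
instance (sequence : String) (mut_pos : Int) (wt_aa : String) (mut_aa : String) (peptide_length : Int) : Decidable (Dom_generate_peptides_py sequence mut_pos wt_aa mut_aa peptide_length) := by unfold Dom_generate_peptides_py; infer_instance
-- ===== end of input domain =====

-- B replaces A's per-window slicing + char-list editing with a sliding-state pass
-- (peeled prefix, growing suffix, advancing WT tail); objective: alternative (equal return values proved).


-- ===== PORT A =====
-- the for-loop with its `break`: recursion over the list of window starts, accumulator `peptides`
def genPepLoopA (cs : List Char) (idx : Int) (mut_aa : String) (peptide_length n : Int) :
    List Int → List (String × String × Int) → List (String × String × Int)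
  | [], acc => acc
  | s :: rest, acc =>
    let e := s + peptide_length
    if e > n then acc  -- break
    else
      let wt_pep := PySem.List.slice cs (some s) (some e)
      let mut_pos_in_pep := idx - s
      let pep_list : List (List Char) := wt_pep.map (fun c => [c])  -- list(wt_pep), chars as 1-elem strings
      -- pep_list[mut_pos_in_pep] = mut_aa; here mut_pos_in_pep = idx - s ≥ 0 always (s ≤ idx from the
      -- range's upper bound), so Python's negative-index wrap / IndexError on assignment cannot occur
      let pep_list := if mut_pos_in_pep < (pep_list.length : Int)
                      then pep_list.set mut_pos_in_pep.toNat mut_aa.toList else pep_list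
      let mut_pep := PySem.Chars.join [] pep_list  -- "".join(pep_list)
      genPepLoopA cs idx mut_aa peptide_length n rest
        (acc ++ [(String.ofList mut_pep, String.ofList wt_pep, mut_pos_in_pep)])

def generate_peptides_py (sequence : String) (mut_pos : Int) (wt_aa : String) (mut_aa : String) (peptide_length : Int) : List (String × String × Int) :=
  let idx := mut_pos - 1
  let cs := sequence.toList
  let seq_len : Int := cs.length
  genPepLoopA cs idx mut_aa peptide_length seq_len
    (PySem.List.pyRange (max 0 (idx - peptide_length + 1)) (min (idx + 1) (seq_len - peptide_length + 1)) 1) []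

-- ===== PORT B =====
-- the while-loop over the window count k: sliding state (pre, suf, wt_rest, pos), accumulator `out`
def genPepLoopB (mu : List Char) (L : Int) :
    Nat → List Char → List Char → List Char → Int → List (String × String × Int) → List (String × String × Int)
  | 0, _, _, _, _, acc => acc
  | Nat.succ k, pre, suf, wt_rest, pos, acc =>
    genPepLoopB mu L k
      (PySem.List.slice pre (some 1) none)                            -- pre = pre[1:]
      (suf ++ PySem.List.slice wt_rest (some L) (some (L + 1)))       -- suf = suf + wt_rest[L:L+1]
      (PySem.List.slice wt_rest (some 1) none)                        -- wt_rest = wt_rest[1:]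
      (pos - 1)
      (acc ++ [(String.ofList (pre ++ mu ++ suf),
                String.ofList (PySem.List.slice wt_rest none (some L)), pos)])

def generate_peptides_py_alt (sequence : String) (mut_pos : Int) (wt_aa : String) (mut_aa : String) (peptide_length : Int) : List (String × String × Int) :=
  let idx := mut_pos - 1
  let L := peptide_length
  let cs := sequence.toList
  let n : Int := cs.length
  let lo := max 0 (idx - L + 1)
  let hi := min (idx + 1) (n - L + 1)
  genPepLoopB mut_aa.toList L (max 0 (hi - lo)).toNat
    (PySem.List.slice cs (some lo) (some idx))          -- pre = sequence[lo:idx]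
    (PySem.List.slice cs (some (idx + 1)) (some (lo + L)))  -- suf = sequence[idx+1:lo+L]
    (PySem.List.slice cs (some lo) none)                -- wt_rest = sequence[lo:]
    (idx - lo) []

-- ===== PRECONDITION & SPEC =====
def Spec_generate_peptides_py (sequence : String) (mut_pos : Int) (wt_aa : String) (mut_aa : String) (peptide_length : Int) (out : List (String × String × Int)) : Prop := out = generate_peptides_py_alt sequence mut_pos wt_aa mut_aa peptide_length
instance (sequence : String) (mut_pos : Int) (wt_aa : String) (mut_aa : String) (peptide_length : Int) (out : List (String × String × Int)) : Decidable (Spec_generate_peptides_py sequence mut_pos wt_aa mut_aa peptide_length out) := by unfold Spec_generate_peptides_py; infer_instance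

-- ===== CLAIM =====
def Claim_equal_generate_peptides_py : Prop := ∀ (sequence : String) (mut_pos : Int) (wt_aa : String) (mut_aa : String) (peptide_length : Int), Dom_generate_peptides_py sequence mut_pos wt_aa mut_aa peptide_length → Spec_generate_peptides_py sequence mut_pos wt_aa mut_aa peptide_length (generate_peptides_py sequence mut_pos wt_aa mut_aa peptide_length)

-- ===== LEMMAS AND PROOFS =====

-- the common window tuple both loops are shown to produce
def genPepWin (cs mu : List Char) (idx L s : Int) : String × String × Int :=
  (String.ofList (PySem.List.slice cs (some s) (some idx) ++ mu
                    ++ PySem.List.slice cs (some (idx + 1)) (some (s + L))),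
   String.ofList (PySem.List.slice cs (some s) (some (s + L))),
   idx - s)

-- "".join with empty separator is concatenation
lemma join_nil_eq_flatten (l : List (List Char)) : PySem.Chars.join [] l = l.flatten := by
  induction l with
  | nil => rfl
  | cons a t ih =>
    cases t with
    | nil => simp [PySem.Chars.join, List.intercalate]
    | cons b u =>
      simp only [PySem.Chars.join] at ih ⊢
      simp only [List.intercalate, List.intersperse, List.flatten] at ih ⊢
      simp_all

lemma flatten_map_single (t : List Char) : (t.map (fun c => [c])).flatten = t := by
  induction t <;> simp_all

-- editing one "character" of the exploded list and flattening = prefix ++ replacement ++ suffix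
lemma flatten_set_singleton (w : List Char) (k : Nat) (m : List Char) (hk : k < w.length) :
    ((w.map (fun c => [c])).set k m).flatten = w.take k ++ m ++ w.drop (k + 1) := by
  induction w generalizing k with
  | nil => simp at hk
  | cons c t ih =>
    cases k with
    | zero => simp [flatten_map_single]
    | succ k =>
      simp only [List.map_cons, List.set_cons_succ, List.flatten_cons, List.take_succ_cons,
        List.drop_succ_cons]
      rw [ih k (by simpa using hk)]
      simp

-- one loop iteration of A produces exactly the common window tuple, for any start in the range
lemma stepA_eq (cs : List Char) (idx peptide_length s : Int) (m : List Char)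
    (h0 : 0 ≤ s) (h1 : idx - peptide_length + 1 ≤ s) (h2 : s ≤ idx)
    (h3 : s + peptide_length ≤ (cs.length : Int)) :
    (idx - s < ((PySem.List.slice cs (some s) (some (s + peptide_length))).length : Int)) ∧
    PySem.Chars.join []
        (((PySem.List.slice cs (some s) (some (s + peptide_length))).map (fun c => [c])).set
          (idx - s).toNat m)
      = PySem.List.slice cs (some s) (some idx) ++ m
          ++ PySem.List.slice cs (some (idx + 1)) (some (s + peptide_length)) := by
  have hpl : 1 ≤ peptide_length := by omega
  have hidx : 0 ≤ idx := le_trans h0 h2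
  rw [PySem.List.slice_toNat cs h0 (by omega), PySem.List.slice_toNat cs h0 hidx,
    PySem.List.slice_toNat cs (by omega) (by omega)]
  set s' := s.toNat with hs'
  have hse : (s + peptide_length).toNat = s' + peptide_length.toNat := by omega
  have hi1 : (idx + 1).toNat = idx.toNat + 1 := by omega
  have hk : (idx - s).toNat = idx.toNat - s' := by omega
  have hlen : s' + peptide_length.toNat ≤ cs.length := by omega
  have hwlen : ((cs.drop s').take ((s + peptide_length).toNat - s')).length = peptide_length.toNat := by
    rw [hse]; simp [List.length_take, List.length_drop]; omega
  constructor
  · rw [hwlen]; omega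
  · rw [join_nil_eq_flatten, flatten_set_singleton _ _ _ (by rw [hwlen]; omega)]
    rw [hse, hi1, hk]
    have h4 : idx.toNat - s' < peptide_length.toNat := by omega
    congr 1
    · congr 1
      · rw [List.take_take]
        congr 1; omega
    · rw [List.drop_take, List.drop_drop]
      congr 1
      · omega
      · congr 1; omega

-- the A-loop equals a map of the common window tuple over any list of in-range starts
lemma loopA_eq_map (cs : List Char) (idx peptide_length : Int) (mut_aa : String)
    (r : List Int) (acc : List (String × String × Int))
    (h : ∀ s ∈ r, 0 ≤ s ∧ idx - peptide_length + 1 ≤ s ∧ s ≤ idx ∧ s + peptide_length ≤ (cs.length : Int)) :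
    genPepLoopA cs idx mut_aa peptide_length (cs.length : Int) r acc
      = acc ++ r.map (genPepWin cs mut_aa.toList idx peptide_length) := by
  induction r generalizing acc with
  | nil => simp [genPepLoopA]
  | cons s rest ih =>
    obtain ⟨h0, h1, h2, h3⟩ := h s (List.mem_cons_self ..)
    obtain ⟨hg, he⟩ := stepA_eq cs idx peptide_length s mut_aa.toList h0 h1 h2 h3
    simp only [genPepLoopA]
    rw [if_neg (by omega)]
    simp only [List.length_map]
    rw [if_pos (by simpa using hg), he,
      ih _ (fun t ht => h t (List.mem_cons_of_mem _ ht))]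
    simp [genPepWin]

-- sliding-state transition facts
lemma pre_step (cs : List Char) (s idx : Int) (h0 : 0 ≤ s) (h2 : s ≤ idx) :
    PySem.List.slice (PySem.List.slice cs (some s) (some idx)) (some 1) none
      = PySem.List.slice cs (some (s + 1)) (some idx) := by
  rw [PySem.List.slice_toNat cs h0 (by omega), PySem.List.slice_toNat cs (by omega) (by omega),
    PySem.List.slice_from _ (by omega)]
  rw [List.drop_take, List.drop_drop]
  simp only [Int.toNat_one]
  have hd : s.toNat + 1 = (s + 1).toNat := by omega
  have ht : idx.toNat - s.toNat - 1 = idx.toNat - (s + 1).toNat := by omega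
  rw [hd, ht]

lemma suf_step (cs : List Char) (s idx L : Int) (h0 : 0 ≤ s) (h2 : s ≤ idx)
    (h1 : idx + 1 ≤ s + L) (hn : s + L + 1 ≤ (cs.length : Int)) :
    PySem.List.slice cs (some (idx + 1)) (some (s + L))
        ++ PySem.List.slice (cs.drop s.toNat) (some L) (some (L + 1))
      = PySem.List.slice cs (some (idx + 1)) (some (s + 1 + L)) := by
  have hL : 0 ≤ L := by omega
  rw [PySem.List.slice_toNat cs (by omega) (by omega),
    PySem.List.slice_toNat cs (by omega) (by omega),
    PySem.List.slice_toNat _ hL (by omega)]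
  rw [List.drop_drop]
  have h1' : (L + 1).toNat - L.toNat = 1 := by omega
  have hm : s.toNat + L.toNat < cs.length := by omega
  rw [h1', List.take_one, List.head?_drop, List.getElem?_eq_getElem hm]
  have h2' : (s + 1 + L).toNat - (idx + 1).toNat = ((s + L).toNat - (idx + 1).toNat) + 1 := by omega
  rw [h2', List.take_succ]
  have hidx : (idx + 1).toNat + ((s + L).toNat - (idx + 1).toNat) = s.toNat + L.toNat := by omega
  rw [List.getElem?_drop, hidx, List.getElem?_eq_getElem hm]

-- the B-loop from the sliding state at start s equals the same map over k consecutive starts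
lemma loopB_eq_map (cs mu : List Char) (idx L : Int) (k : Nat) (s : Int)
    (acc : List (String × String × Int)) (h0 : 0 ≤ s)
    (h : ∀ j : Nat, j < k → s + j ≤ idx ∧ idx - L + 1 ≤ s + j ∧ s + j + L ≤ (cs.length : Int)) :
    genPepLoopB mu L k
        (PySem.List.slice cs (some s) (some idx))
        (PySem.List.slice cs (some (idx + 1)) (some (s + L)))
        (cs.drop s.toNat) (idx - s) acc
      = acc ++ (List.range k).map (fun j : Nat => genPepWin cs mu idx L (s + (j : Int))) := by
  induction k generalizing s acc with
  | zero => simp [genPepLoopB]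
  | succ k ih =>
    obtain ⟨h2, h1, h3⟩ := h 0 (Nat.succ_pos k)
    simp only [Int.natCast_zero, add_zero] at h2 h1 h3
    have hL : 1 ≤ L := by omega
    simp only [genPepLoopB]
    -- head element is genPepWin cs mu idx L s
    have hwt : PySem.List.slice (cs.drop s.toNat) none (some L)
        = PySem.List.slice cs (some s) (some (s + L)) := by
      rw [PySem.List.slice_to _ (by omega), PySem.List.slice_toNat cs h0 (by omega)]
      congr 1; omega
    rw [hwt, pre_step cs s idx h0 h2,
      PySem.List.slice_from (cs.drop s.toNat) (by omega)]
    rw [List.drop_drop]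
    simp only [Int.toNat_one]
    have hs1 : s.toNat + 1 = (s + 1).toNat := by omega
    rw [hs1]
    cases k with
    | zero =>
      simp [genPepLoopB, genPepWin]
    | succ k' =>
      have hnext := h 1 (by omega)
      have hsuf : PySem.List.slice cs (some (idx + 1)) (some (s + L))
            ++ PySem.List.slice (cs.drop s.toNat) (some L) (some (L + 1))
          = PySem.List.slice cs (some (idx + 1)) (some (s + 1 + L)) := by
        apply suf_step cs s idx L h0 h2 (by omega)
        have := hnext.2.2
        push_cast at this
        omega
      rw [hsuf]
      have hpos : idx - s - 1 = idx - (s + 1) := by omega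
      rw [hpos, ih (s + 1) _ (by omega)
        (fun j hj => by
          have := h (j + 1) (by omega)
          constructor
          · have := this.1; push_cast at this ⊢; omega
          constructor
          · have := this.2.1; push_cast at this ⊢; omega
          · have := this.2.2; push_cast at this ⊢; omega)]
      rw [List.append_assoc]
      congr 1
      conv_rhs => rw [List.range_succ_eq_map, List.map_cons, List.map_map]
      simp only [List.singleton_append]
      congr 1
      · simp [genPepWin]
      · apply List.map_congr_left
        intro j _
        simp only [Function.comp_apply]
        congr 1
        push_cast
        ring

-- main equality
theorem generate_peptides_py_spec_aux (sequence : String) (mut_pos : Int) (wt_aa : String)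
    (mut_aa : String) (peptide_length : Int) :
    generate_peptides_py sequence mut_pos wt_aa mut_aa peptide_length
      = generate_peptides_py_alt sequence mut_pos wt_aa mut_aa peptide_length := by
  unfold generate_peptides_py generate_peptides_py_alt
  simp only []
  set idx := mut_pos - 1 with hidx
  set cs := sequence.toList with hcs
  set L := peptide_length with hLdef
  set lo := max 0 (idx - L + 1) with hlo
  set hi := min (idx + 1) ((cs.length : Int) - L + 1) with hhi
  have hlo0 : (0 : Int) ≤ lo := le_max_left _ _
  rw [loopA_eq_map cs idx L mut_aa _ []
    (fun s hs => by rw [PySem.List.mem_pyRange_one] at hs; omega)]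
  rw [PySem.List.slice_from cs hlo0]
  rw [loopB_eq_map cs mut_aa.toList idx L _ lo [] hlo0
    (fun j hj => by
      have hj' : (j : Int) < hi - lo := by omega
      refine ⟨by omega, by omega, by omega⟩)]
  rw [PySem.List.pyRange_one]
  have hk : (max 0 (hi - lo)).toNat = (hi - lo).toNat := by omega
  rw [hk, List.map_map]
  simp [Function.comp]

-- ===== VERDICT =====
theorem generate_peptides_py_spec : Claim_equal_generate_peptides_py := by
  intro sequence mut_pos wt_aa mut_aa peptide_length _
  exact generate_peptides_py_spec_aux sequence mut_pos wt_aa mut_aa peptide_length
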